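-- pv_equiv track=rewrite | github.com/letchupkt/Bug-Bounty-Roadmap | resources/scripts/scanners/sql-injection-scanner.py | detect_union_success
-- ===== SOURCE A (Python) =====
-- def detect_union_success(response_text: str, payload: str) -> bool:
--     """Detect successful union injection"""
--     # Look for common union injection success indicators
--     union_indicators = [
--         'mysql',
--         'version()',
--         'database()',
--         'information_schema',
--         'table_name',
--         'column_name'
--     ]
--
--     response_lower = response_text.lower()
--     return any(indicator in response_lower for indicator in union_indicators)
-- ===== SOURCE B (Python) =====
-- def detect_union_success(response_text: str, payload: str) -> bool:
--     """Detect successful union injection: single left-to-right scan over positions."""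
--     union_indicators = (
--         'mysql',
--         'version()',
--         'database()',
--         'information_schema',
--         'table_name',
--         'column_name',
--     )
--     s = response_text.lower()
--     for i in range(len(s) + 1):
--         for indicator in union_indicators:
--             if s.startswith(indicator, i):
--                 return True
--     return False
-- ===== Notes on version B (the rewrite author's own statement) =====
-- stated objective: alternative
-- what changed: A runs six independent substring ('in') scans over the lowercased text; B makes one left-to-right pass over the positions of the text, testing at each position whether any indicator starts there (early-exit on first hit).
import Mathlib
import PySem

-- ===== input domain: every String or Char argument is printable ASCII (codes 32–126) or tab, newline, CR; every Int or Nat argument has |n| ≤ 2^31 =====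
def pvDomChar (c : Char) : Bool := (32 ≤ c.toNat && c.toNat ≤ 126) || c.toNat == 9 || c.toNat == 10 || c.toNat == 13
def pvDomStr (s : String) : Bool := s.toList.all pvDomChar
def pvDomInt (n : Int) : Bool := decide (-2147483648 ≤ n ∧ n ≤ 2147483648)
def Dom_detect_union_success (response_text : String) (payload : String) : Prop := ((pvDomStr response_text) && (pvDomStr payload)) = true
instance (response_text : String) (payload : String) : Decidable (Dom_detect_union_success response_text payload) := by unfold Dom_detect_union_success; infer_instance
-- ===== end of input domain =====

-- ===== PORT A =====
-- B changes the traversal: one positional left-to-right scan instead of six independent substring scans (objective: alternative).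
def detect_union_success (response_text : String) (payload : String) : Bool :=
  let union_indicators : List String :=
    ["mysql", "version()", "database()", "information_schema", "table_name", "column_name"]
  let response_lower := PySem.Str.lower response_text
  union_indicators.any (fun indicator => PySem.Str.isIn indicator response_lower)

-- ===== PORT B =====
-- Source B's loop 'for i in range(len(s)+1): for indicator in ...: if s.startswith(indicator, i)':
-- structural recursion over the successive suffixes s[i:] (s.startswith(ind, i) = ind is a prefix of s[i:]).
def pvAltScan (inds : List (List Char)) : List Char → Bool
  | [] => inds.any (fun ind => PySem.Chars.startswith [] ind)
  | c :: rest =>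
      (inds.any (fun ind => PySem.Chars.startswith (c :: rest) ind)) || pvAltScan inds rest

def detect_union_success_alt (response_text : String) (payload : String) : Bool :=
  let union_indicators : List (List Char) :=
    ["mysql".toList, "version()".toList, "database()".toList,
     "information_schema".toList, "table_name".toList, "column_name".toList]
  pvAltScan union_indicators (PySem.Str.lower response_text).toList

-- ===== PRECONDITION & SPEC =====
def Spec_detect_union_success (response_text : String) (payload : String) (out : Bool) : Prop := out = detect_union_success_alt response_text payload
instance (response_text : String) (payload : String) (out : Bool) : Decidable (Spec_detect_union_success response_text payload out) := by unfold Spec_detect_union_success; infer_instance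

-- ===== CLAIM (what is proved, stated in full; the proofs are below) =====
def Claim_equal_detect_union_success : Prop := ∀ (response_text : String) (payload : String), Dom_detect_union_success response_text payload → Spec_detect_union_success response_text payload (detect_union_success response_text payload)

-- ===== LEMMAS AND PROOFS =====
theorem pvAltScan_eq (inds : List (List Char)) (cs : List Char) :
    pvAltScan inds cs = inds.any (fun ind => PySem.Chars.isIn ind cs) := by
  induction cs with
  | nil =>
      simp only [pvAltScan]
      refine List.any_congr rfl fun ind => ?_
      rw [Bool.eq_iff_iff, PySem.Chars.startswith_iff, PySem.Chars.isIn_iff_infix]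
      simp
  | cons c rest ih =>
      simp only [pvAltScan, ih]
      rw [Bool.eq_iff_iff]
      simp only [Bool.or_eq_true, List.any_eq_true, PySem.Chars.startswith_iff,
        PySem.Chars.isIn_iff_infix, List.infix_cons_iff]
      constructor
      · rintro (⟨i, hi, h⟩ | ⟨i, hi, h⟩)
        · exact ⟨i, hi, Or.inl h⟩
        · exact ⟨i, hi, Or.inr h⟩
      · rintro ⟨i, hi, h | h⟩
        · exact Or.inl ⟨i, hi, h⟩
        · exact Or.inr ⟨i, hi, h⟩

-- ===== VERDICT (by name: the statement is the Claim_ definition above) =====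
theorem detect_union_success_spec : Claim_equal_detect_union_success := by
  intro response_text payload _
  unfold Spec_detect_union_success detect_union_success detect_union_success_alt
  rw [pvAltScan_eq]
  simp only [PySem.Str.isIn_eq, List.any_cons, List.any_nil]
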